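-- pv_equiv track=rewrite | github.com/mas16/keywords | cosine_calc.py | populate_vectorspace
-- ===== SOURCE A (Python) =====
-- def populate_vectorspace(v1, combined):
--     """Populate text vector space with TFs from each author."""
--     t1 = []
--     for entry in combined:
--         #Initialize counter
--         c = 0
--         for item in v1:
--             if entry == item[0]:
--                 t1.append(item)
--                 c += 1
--         #For specific case where TF is 0
--         if c == 0:
--             t1.append([entry,0])
--     return t1
-- ===== SOURCE B (Python) =====
-- def populate_vectorspace(v1, combined):
--     """Populate text vector space with TFs from each author."""
--     index = {}
--     for item in v1:
--         index[item[0]] = index.get(item[0], []) + [item]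
--     t1 = []
--     for entry in combined:
--         matches = index.get(entry, [])
--         if matches:
--             t1 += matches
--         else:
--             t1.append([entry, 0])
--     return t1
-- ===== Notes on version B (the rewrite author's own statement) =====
-- stated objective: faster
-- what changed: B builds a dictionary from term to its matching v1 items in one pass, then a single pass over combined replaces A's inner scan of v1 for every entry.
import Mathlib
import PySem

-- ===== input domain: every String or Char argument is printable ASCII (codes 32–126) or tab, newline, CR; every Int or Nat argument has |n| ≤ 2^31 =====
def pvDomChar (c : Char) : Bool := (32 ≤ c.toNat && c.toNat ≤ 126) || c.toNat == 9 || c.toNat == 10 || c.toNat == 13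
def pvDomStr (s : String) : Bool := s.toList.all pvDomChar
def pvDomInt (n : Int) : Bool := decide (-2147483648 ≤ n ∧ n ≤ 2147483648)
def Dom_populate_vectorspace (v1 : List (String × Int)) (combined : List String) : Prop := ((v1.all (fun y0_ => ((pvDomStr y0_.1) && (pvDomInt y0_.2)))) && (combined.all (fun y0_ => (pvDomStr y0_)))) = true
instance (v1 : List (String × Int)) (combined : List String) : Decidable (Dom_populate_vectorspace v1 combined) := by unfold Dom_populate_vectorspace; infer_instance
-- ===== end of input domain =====

-- B replaces A's inner scan of v1 per entry by one dictionary (term -> matching items) built once; objective: faster (asymptotic).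

-- ===== PORT A =====
-- for entry in combined: scan v1, appending matches and counting them; append (entry, 0) if none matched
def populate_vectorspace (v1 : List (String × Int)) (combined : List String) : List (String × Int) :=
  combined.foldl (fun t1 entry =>
    let r := v1.foldl (fun (p : List (String × Int) × Int) item =>
      if entry = item.1 then (p.1 ++ [item], p.2 + 1) else p) (t1, 0)
    if r.2 = 0 then r.1 ++ [(entry, 0)] else r.1) []

-- ===== PORT B =====
-- index[item[0]] = index.get(item[0], []) + [item]
def pvIndex (v1 : List (String × Int)) : PySem.Dict String (List (String × Int)) :=
  v1.foldl (fun d item => d.modify item.1 [] (· ++ [item])) PySem.Dict.empty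

def populate_vectorspace_alt (v1 : List (String × Int)) (combined : List String) : List (String × Int) :=
  let index := pvIndex v1
  combined.foldl (fun t1 entry =>
    let ms := index.getD entry []
    if ms ≠ [] then t1 ++ ms else t1 ++ [(entry, 0)]) []

-- ===== PRECONDITION & SPEC =====
def Spec_populate_vectorspace (v1 : List (String × Int)) (combined : List String) (out : List (String × Int)) : Prop := out = populate_vectorspace_alt v1 combined
instance (v1 : List (String × Int)) (combined : List String) (out : List (String × Int)) : Decidable (Spec_populate_vectorspace v1 combined out) := by unfold Spec_populate_vectorspace; infer_instance

-- ===== CLAIM (what is proved, stated in full; the proofs are below) =====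
def Claim_equal_populate_vectorspace : Prop := ∀ (v1 : List (String × Int)) (combined : List String), Dom_populate_vectorspace v1 combined → Spec_populate_vectorspace v1 combined (populate_vectorspace v1 combined)

-- ===== LEMMAS AND PROOFS =====

-- A's inner scan appends exactly the matching items and counts them.
theorem pv_inner_scan (v1 : List (String × Int)) (entry : String) (t1 : List (String × Int)) (c : Int) :
    v1.foldl (fun (p : List (String × Int) × Int) item =>
      if entry = item.1 then (p.1 ++ [item], p.2 + 1) else p) (t1, c)
    = (t1 ++ v1.filter (fun item => item.1 == entry),
       c + (v1.filter (fun item => item.1 == entry)).length) := by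
  induction v1 generalizing t1 c with
  | nil => simp
  | cons hd tl ih =>
    by_cases h : entry = hd.1
    · rw [List.foldl_cons, if_pos h, ih, List.filter_cons,
        if_pos (by simpa using h.symm)]
      simp [List.append_assoc]
      omega
    · rw [List.foldl_cons, if_neg h, ih, List.filter_cons,
        if_neg (by simpa using fun e => h e.symm)]

-- B's index lookup yields exactly the matching items.
theorem pv_index_getD (v1 : List (String × Int)) (entry : String) :
    (pvIndex v1).getD entry [] = v1.filter (fun item => item.1 == entry) := by
  have h := PySem.Dict.getD_foldl_modify_append
      (l := v1.map (fun it => (it.1, it))) (d := PySem.Dict.empty) (c := entry)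
  rw [List.foldl_map] at h
  unfold pvIndex
  rw [h]
  simp [List.filter_map, Function.comp_def]

theorem populate_vectorspace_eq (v1 : List (String × Int)) (combined : List String) :
    populate_vectorspace v1 combined = populate_vectorspace_alt v1 combined := by
  unfold populate_vectorspace populate_vectorspace_alt
  simp only []
  apply List.foldl_ext
  intro t1 entry _
  rw [pv_inner_scan, pv_index_getD]
  rcases hf : v1.filter (fun item => item.1 == entry) with _ | ⟨a, l⟩
  · simp [hf]
  · simp [hf]; omega

-- ===== VERDICT (by name: the statement is the Claim_ definition above) =====
theorem populate_vectorspace_spec : Claim_equal_populate_vectorspace := by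
  intro v1 combined _
  exact populate_vectorspace_eq v1 combined
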